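-- pv_equiv track=rewrite | github.com/JuliusTruksinas/it-vbe-python | 2012/main-session/u1/main.py | find_players_with_most_play_and_rest_time
-- ===== SOURCE A (Python) =====
-- PLAY_TIMES = "play_times"
--
-- REST_TIMES = "rest_times"
--
-- def find_players_with_most_play_and_rest_time(players):
--     players_with_most_play_time = []
--     players_with_most_rest_time = []
--
--     most_time_played_by_player = max([sum(item[1][PLAY_TIMES]) for item in players.items()])
--     most_time_rested_by_player = max([sum(item[1][REST_TIMES]) for item in players.items()])
--
--     for player_number, player_data in players.items():
--         total_time_played = sum(player_data[PLAY_TIMES])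
--         total_time_rested = sum(player_data[REST_TIMES])
--
--         if total_time_played >= most_time_played_by_player:
--             players_with_most_play_time.append((player_number, total_time_played))
--         if total_time_rested >= most_time_rested_by_player:
--             players_with_most_rest_time.append((player_number, total_time_rested))
--
--     return min(players_with_most_play_time, key=lambda item: item[0]), min(players_with_most_rest_time, key=lambda item: item[0])
-- ===== SOURCE B (Python) =====
-- PLAY_TIMES = "play_times"
--
-- REST_TIMES = "rest_times"
--
-- def find_players_with_most_play_and_rest_time(players):
--     items = list(players.items())
--     first_number, first_data = items[0]
--     best_play = (first_number, sum(first_data[PLAY_TIMES]))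
--     best_rest = (first_number, sum(first_data[REST_TIMES]))
--     for number, data in items[1:]:
--         play = sum(data[PLAY_TIMES])
--         rest = sum(data[REST_TIMES])
--         if play > best_play[1]:
--             best_play = (number, play)
--         elif play == best_play[1]:
--             best_play = (min(best_play[0], number), play)
--         if rest > best_rest[1]:
--             best_rest = (number, rest)
--         elif rest == best_rest[1]:
--             best_rest = (min(best_rest[0], number), rest)
--     return best_play, best_rest
-- ===== Notes on version B (the rewrite author's own statement) =====
-- stated objective: simpler
-- what changed: B replaces A's two full max-scans plus a collect-candidates-then-min pass with a single fold that keeps, for play and for rest, the running maximum sum together with the minimum player number attaining it.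
import Mathlib
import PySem

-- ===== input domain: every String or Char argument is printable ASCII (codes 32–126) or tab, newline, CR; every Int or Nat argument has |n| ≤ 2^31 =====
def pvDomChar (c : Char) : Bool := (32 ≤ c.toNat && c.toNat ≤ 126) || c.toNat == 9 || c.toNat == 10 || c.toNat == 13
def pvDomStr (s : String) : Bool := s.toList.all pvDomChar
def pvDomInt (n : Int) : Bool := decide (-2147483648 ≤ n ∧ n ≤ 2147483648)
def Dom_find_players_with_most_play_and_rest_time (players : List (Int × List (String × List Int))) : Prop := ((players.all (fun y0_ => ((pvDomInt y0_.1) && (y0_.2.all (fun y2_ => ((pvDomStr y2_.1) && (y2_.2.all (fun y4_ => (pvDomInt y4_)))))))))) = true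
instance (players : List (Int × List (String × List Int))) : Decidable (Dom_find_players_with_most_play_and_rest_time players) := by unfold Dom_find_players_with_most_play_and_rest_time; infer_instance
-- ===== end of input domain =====

-- B replaces A's two max-scans plus a collect-then-min pass with one fold keeping the running
-- max sum and the minimum player number attaining it (simpler: one pass, O(1) extra state).

-- ===== PORT A =====
-- sum(xs)
def pvSum (l : List Int) : Int := l.foldl (· + ·) 0
-- sum(d[PLAY_TIMES]) / sum(d[REST_TIMES]); the KeyError case (get? = none) is excluded by Pre_
def pvPlay (d : List (String × List Int)) : Int := pvSum (((PySem.Dict.mk d).get? "play_times").getD [])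
def pvRest (d : List (String × List Int)) : Int := pvSum (((PySem.Dict.mk d).get? "rest_times").getD [])

def find_players_with_most_play_and_rest_time (players : List (Int × List (String × List Int))) : (Int × Int) × (Int × Int) :=
  let mostPlay := (PySem.List.max? (players.map (fun it => pvPlay it.2)) (fun x => x)).getD 0
  let mostRest := (PySem.List.max? (players.map (fun it => pvRest it.2)) (fun x => x)).getD 0
  let lists := players.foldl
    (fun (acc : List (Int × Int) × List (Int × Int)) it =>
      (if pvPlay it.2 ≥ mostPlay then acc.1 ++ [(it.1, pvPlay it.2)] else acc.1,
       if pvRest it.2 ≥ mostRest then acc.2 ++ [(it.1, pvRest it.2)] else acc.2))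
    ([], [])
  ((PySem.List.min? lists.1 (fun q => q.1)).getD (0, 0),
   (PySem.List.min? lists.2 (fun q => q.1)).getD (0, 0))

-- ===== PORT B =====
-- keep the better of the running best (number, sum) and a new candidate; ties keep the min number
def pvBetter (b c : Int × Int) : Int × Int :=
  if c.2 > b.2 then c else if c.2 = b.2 then (min b.1 c.1, b.2) else b

def find_players_with_most_play_and_rest_time_alt (players : List (Int × List (String × List Int))) : (Int × Int) × (Int × Int) :=
  match players with
  | [] => ((0, 0), (0, 0))   -- Python B raises IndexError here; outside Pre_
  | p :: t =>
    t.foldl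
      (fun (s : (Int × Int) × (Int × Int)) it =>
        (pvBetter s.1 (it.1, pvPlay it.2), pvBetter s.2 (it.1, pvRest it.2)))
      ((p.1, pvPlay p.2), (p.1, pvRest p.2))

-- ===== PRECONDITION & SPEC =====
-- A raises ValueError (max of empty) on an empty dict and KeyError when a player's data lacks
-- "play_times" or "rest_times"; Pre_ excludes exactly those inputs.
def Pre_find_players_with_most_play_and_rest_time (players : List (Int × List (String × List Int))) : Prop :=
  players ≠ [] ∧ ∀ it ∈ players,
    ((PySem.Dict.mk it.2).get? "play_times").isSome = true ∧
    ((PySem.Dict.mk it.2).get? "rest_times").isSome = true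
instance (players : List (Int × List (String × List Int))) : Decidable (Pre_find_players_with_most_play_and_rest_time players) := by unfold Pre_find_players_with_most_play_and_rest_time; infer_instance
def pvWitness_find_players_with_most_play_and_rest_time : (List (Int × List (String × List Int))) :=
  [(1, [("play_times", [3, 4]), ("rest_times", [2])]), (2, [("play_times", [7]), ("rest_times", [1, 1])])]

def Spec_find_players_with_most_play_and_rest_time (players : List (Int × List (String × List Int))) (out : (Int × Int) × (Int × Int)) : Prop := out = find_players_with_most_play_and_rest_time_alt players
instance (players : List (Int × List (String × List Int))) (out : (Int × Int) × (Int × Int)) : Decidable (Spec_find_players_with_most_play_and_rest_time players out) := by unfold Spec_find_players_with_most_play_and_rest_time; infer_instance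

-- ===== CLAIM (what is proved, stated in full; the proofs are below) =====
def Claim_equal_find_players_with_most_play_and_rest_time : Prop := ∀ (players : List (Int × List (String × List Int))), Dom_find_players_with_most_play_and_rest_time players → Pre_find_players_with_most_play_and_rest_time players → Spec_find_players_with_most_play_and_rest_time players (find_players_with_most_play_and_rest_time players)

-- ===== LEMMAS AND PROOFS =====

-- running maximum of the second components, seeded with p.2
def pvMaxSnd (p : Int × Int) (t : List (Int × Int)) : Int :=
  t.foldl (fun a q => max a q.2) p.2

theorem pvBetter_snd (p q : Int × Int) : (pvBetter p q).2 = max p.2 q.2 := by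
  unfold pvBetter; split_ifs <;> simp <;> omega

theorem pvMaxSnd_cons (p q : Int × Int) (t : List (Int × Int)) :
    pvMaxSnd p (q :: t) = pvMaxSnd (pvBetter p q) t := by
  simp [pvMaxSnd, pvBetter_snd]

-- min? with key fst over a nonempty list whose elements all have snd = M is the fold-min of the fsts paired with M
theorem pvMin_const_snd (M : Int) (x : Int × Int) (l : List (Int × Int))
    (hx : x.2 = M) (h : ∀ y ∈ l, y.2 = M) :
    PySem.List.min? (x :: l) (fun q => q.1) = some ((l.map Prod.fst).foldl min x.1, M) := by
  obtain ⟨m, hm⟩ : ∃ m, PySem.List.min? (x :: l) (fun q => q.1) = some m := by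
    cases hc : PySem.List.min? (x :: l) (fun q => q.1) with
    | none => exact absurd ((PySem.List.min?_eq_none_iff (x :: l) (fun q => q.1)).mp hc) (by simp)
    | some m => exact ⟨m, rfl⟩
  have hmem : m ∈ x :: l := PySem.List.min?_mem hm
  have hmin : ∀ y ∈ x :: l, m.1 ≤ y.1 := PySem.List.min?_isMin hm
  have hm2 : m.2 = M := by
    rcases List.mem_cons.mp hmem with h1 | h1
    · rw [h1]; exact hx
    · exact h m h1
  have hfle := PySem.List.foldl_min_le (l.map Prod.fst) x.1
  have hfmem := PySem.List.foldl_min_mem (l.map Prod.fst) x.1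
  have h1 : m.1 ≤ (l.map Prod.fst).foldl min x.1 := by
    rcases hfmem with he | he
    · rw [he]; exact hmin x (List.mem_cons_self)
    · obtain ⟨y, hy, hy1⟩ := List.mem_map.mp he
      rw [← hy1]; exact hmin y (List.mem_cons_of_mem _ hy)
  have h2 : (l.map Prod.fst).foldl min x.1 ≤ m.1 := by
    rcases List.mem_cons.mp hmem with he | he
    · rw [he]; exact hfle.1
    · exact hfle.2 m.1 (List.mem_map.mpr ⟨m, he, rfl⟩)
  rw [hm]
  have : m = ((l.map Prod.fst).foldl min x.1, M) := by
    have := le_antisymm h1 h2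
    exact Prod.ext this hm2
  rw [this]

-- the heart: A's filter-then-min equals B's single fold, for any seed p and tail t of (number, sum) pairs
theorem pvCore (t : List (Int × Int)) (p : Int × Int) :
    (PySem.List.min? ((p :: t).filter (fun q => decide (q.2 ≥ pvMaxSnd p t))) (fun q => q.1)).getD (0, 0)
    = t.foldl pvBetter p := by
  induction t generalizing p with
  | nil =>
    simp only [pvMaxSnd, List.foldl_nil, List.filter_cons, List.filter_nil]
    rw [if_pos (by simp)]
    rw [pvMin_const_snd p.2 p [] rfl (by simp)]
    simp
  | cons q t' ih =>
    have hM := pvMaxSnd_cons p q t'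
    have hbounds := PySem.List.le_foldl_max_int (q :: t') Prod.snd p.2
    have hp2 : p.2 ≤ pvMaxSnd p (q :: t') := hbounds.1
    have hq2 : q.2 ≤ pvMaxSnd p (q :: t') := hbounds.2 q (List.mem_cons_self)
    have ht' : ∀ y ∈ t', y.2 ≤ pvMaxSnd p (q :: t') := fun y hy => hbounds.2 y (List.mem_cons_of_mem _ hy)
    have key : ((p :: q :: t').filter (fun z => decide (z.2 ≥ pvMaxSnd p (q :: t'))))
        = ((pvBetter p q :: t').filter (fun z => decide (z.2 ≥ pvMaxSnd p (q :: t')))) ∨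
        (PySem.List.min? ((p :: q :: t').filter (fun z => decide (z.2 ≥ pvMaxSnd p (q :: t')))) (fun z => z.1)
          = PySem.List.min? ((pvBetter p q :: t').filter (fun z => decide (z.2 ≥ pvMaxSnd p (q :: t')))) (fun z => z.1)) := by
      set M := pvMaxSnd p (q :: t') with hMdef
      rcases lt_trichotomy q.2 p.2 with hlt | heq | hgt
      · -- q.2 < p.2 : pvBetter p q = p, and q is dropped (q.2 < p.2 ≤ M)
        left
        have hb : pvBetter p q = p := by unfold pvBetter; rw [if_neg (by omega), if_neg (by omega)]
        rw [hb]
        by_cases hp : p.2 ≥ M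
        · rw [List.filter_cons_of_pos (by simpa using hp), List.filter_cons_of_neg (by simp; omega),
              List.filter_cons_of_pos (by simpa using hp)]
        · rw [List.filter_cons_of_neg (by simpa using hp), List.filter_cons_of_neg (by simp; omega),
              List.filter_cons_of_neg (by simpa using hp)]
      · -- q.2 = p.2 : pvBetter p q = (min p.1 q.1, p.2)
        have hb : pvBetter p q = (min p.1 q.1, p.2) := by
          unfold pvBetter; rw [if_neg (by omega), if_pos heq]
        by_cases hpM : p.2 ≥ M
        · -- every candidate has snd = M = p.2 : compare the two min?s by value
          right
          have hpeq : p.2 = M := le_antisymm hp2 hpM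
          have hF : ∀ y ∈ t'.filter (fun z => decide (z.2 ≥ M)), y.2 = M := by
            intro y hy
            have h1 := List.of_mem_filter hy
            have h2 := ht' y (List.mem_of_mem_filter hy)
            simp at h1; omega
          rw [hb, List.filter_cons_of_pos (by simp; omega), List.filter_cons_of_pos (by simp; omega),
              List.filter_cons_of_pos (by simp; omega)]
          rw [pvMin_const_snd M p _ hpeq (by
                intro y hy
                rcases List.mem_cons.mp hy with h1 | h1
                · rw [h1]; omega
                · exact hF y h1)]
          rw [pvMin_const_snd M (min p.1 q.1, p.2) _ (by simpa using hpeq) hF]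
          simp
        · -- p.2 = q.2 < M : all three heads are dropped
          left
          rw [hb, List.filter_cons_of_neg (by simp; omega), List.filter_cons_of_neg (by simp; omega),
              List.filter_cons_of_neg (by simp; omega)]
      · -- p.2 < q.2 : pvBetter p q = q, and p is dropped
        left
        have hb : pvBetter p q = q := by unfold pvBetter; rw [if_pos hgt]
        rw [hb, List.filter_cons_of_neg (by simp; omega)]
    have step : (PySem.List.min? ((p :: q :: t').filter (fun z => decide (z.2 ≥ pvMaxSnd p (q :: t')))) (fun z => z.1)).getD (0, 0)
        = (PySem.List.min? ((pvBetter p q :: t').filter (fun z => decide (z.2 ≥ pvMaxSnd p (q :: t')))) (fun z => z.1)).getD (0, 0) := by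
      rcases key with hk | hk
      · rw [hk]
      · rw [hk]
    calc (PySem.List.min? ((p :: q :: t').filter (fun z => decide (z.2 ≥ pvMaxSnd p (q :: t')))) (fun z => z.1)).getD (0, 0)
        = (PySem.List.min? ((pvBetter p q :: t').filter (fun z => decide (z.2 ≥ pvMaxSnd (pvBetter p q) t'))) (fun z => z.1)).getD (0, 0) := by
          rw [step, hM]
      _ = t'.foldl pvBetter (pvBetter p q) := ih (pvBetter p q)
      _ = (q :: t').foldl pvBetter p := by simp

-- A's play/rest component over players = p :: t, expressed over the mapped pair list
theorem pvComponent (p : Int × List (String × List Int)) (t : List (Int × List (String × List Int)))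
    (f : List (String × List Int) → Int) :
    (PySem.List.min?
      (((p :: t).foldl
        (fun (acc : List (Int × Int)) it =>
          if f it.2 ≥ (PySem.List.max? ((p :: t).map (fun it => f it.2)) (fun x => x)).getD 0
          then acc ++ [(it.1, f it.2)] else acc) []))
      (fun q => q.1)).getD (0, 0)
    = t.foldl (fun s it => pvBetter s (it.1, f it.2)) (p.1, f p.2) := by
  have hmax : (PySem.List.max? ((p :: t).map (fun it => f it.2)) (fun x => x)).getD 0
      = pvMaxSnd (p.1, f p.2) (t.map (fun it => (it.1, f it.2))) := by
    rw [List.map_cons, PySem.List.max?_id_cons]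
    simp [pvMaxSnd, List.foldl_map]
  rw [hmax]
  have happ := PySem.List.foldl_append_ite
    (p := fun it : Int × List (String × List Int) => f it.2 ≥ pvMaxSnd (p.1, f p.2) (t.map (fun it => (it.1, f it.2))))
    (f := fun it : Int × List (String × List Int) => (it.1, f it.2)) (l := p :: t) (acc := [])
  simp only [happ]
  have hfm : ((p :: t).filter (fun it => decide (f it.2 ≥ pvMaxSnd (p.1, f p.2) (t.map (fun it => (it.1, f it.2)))))).map (fun it => (it.1, f it.2))
      = ((p :: t).map (fun it => (it.1, f it.2))).filter (fun z => decide (z.2 ≥ pvMaxSnd (p.1, f p.2) (t.map (fun it => (it.1, f it.2))))) := by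
    rw [List.filter_map]
    rfl
  rw [List.nil_append, hfm, List.map_cons]
  have hc := pvCore (t.map (fun it => (it.1, f it.2))) (p.1, f p.2)
  rw [List.foldl_map] at hc
  exact hc

-- ===== VERDICT (by name: the statement is the Claim_ definition above) =====
theorem find_players_with_most_play_and_rest_time_spec : Claim_equal_find_players_with_most_play_and_rest_time := by
  intro players _ hpre
  unfold Spec_find_players_with_most_play_and_rest_time
  obtain ⟨hne, -⟩ := hpre
  cases players with
  | nil => exact absurd rfl hne
  | cons p t =>
    have hprodA := PySem.List.foldl_prod_mk
      (f := fun acc it => if pvPlay it.2 ≥ (PySem.List.max? ((p :: t).map (fun it => pvPlay it.2)) (fun x => x)).getD 0 then acc ++ [(it.1, pvPlay it.2)] else acc)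
      (g := fun acc it => if pvRest it.2 ≥ (PySem.List.max? ((p :: t).map (fun it => pvRest it.2)) (fun x => x)).getD 0 then acc ++ [(it.1, pvRest it.2)] else acc)
      (l := p :: t) (a := ([] : List (Int × Int))) (b := ([] : List (Int × Int)))
    have hprodB := PySem.List.foldl_prod_mk
      (f := fun s it => pvBetter s (it.1, pvPlay it.2))
      (g := fun s it => pvBetter s (it.1, pvRest it.2))
      (l := t) (a := (p.1, pvPlay p.2)) (b := (p.1, pvRest p.2))
    have hplay := pvComponent p t pvPlay
    have hrest := pvComponent p t pvRest
    simp only [find_players_with_most_play_and_rest_time,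
      find_players_with_most_play_and_rest_time_alt]
    simp only [hprodA, hprodB]
    exact Prod.ext hplay hrest
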